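-- pv_equiv track=rewrite | github.com/Rhn12/BaekJoon | 백준/Gold/1034. 램프/램프.py | count_on_rows_after_switch
-- ===== SOURCE A (Python) =====
-- def count_on_rows_after_switch(lamps, n, m, k):
--     max_on_rows = 0
--
--     for row in lamps:
--         zero_count = row.count('0')
--         if zero_count <= k and (k - zero_count) % 2 == 0:
--             similar_rows = lamps.count(row)
--             max_on_rows = max(max_on_rows, similar_rows)
--
--     return max_on_rows
-- ===== SOURCE B (Python) =====
-- def count_on_rows_after_switch(lamps, n, m, k):
--     # Sort the rows, then one linear scan: equal rows are contiguous, so the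
--     # length of a run is that pattern's multiplicity; keep the best qualifying run.
--     def ok(row):
--         z = row.count('0')
--         return z <= k and (k - z) % 2 == 0
--     best = 0
--     run = 0
--     prev = None
--     for row in sorted(lamps):
--         if prev == row:
--             run += 1
--         else:
--             run = 1
--             prev = row
--         if run > best and ok(row):
--             best = run
--     return best
-- ===== Notes on version B (the rewrite author's own statement) =====
-- stated objective: alternative
-- what changed: B sorts the rows and makes one linear scan over runs of equal rows (a run's length is that pattern's multiplicity), instead of A's per-row rescan of the whole list with lamps.count.
import Mathlib
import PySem

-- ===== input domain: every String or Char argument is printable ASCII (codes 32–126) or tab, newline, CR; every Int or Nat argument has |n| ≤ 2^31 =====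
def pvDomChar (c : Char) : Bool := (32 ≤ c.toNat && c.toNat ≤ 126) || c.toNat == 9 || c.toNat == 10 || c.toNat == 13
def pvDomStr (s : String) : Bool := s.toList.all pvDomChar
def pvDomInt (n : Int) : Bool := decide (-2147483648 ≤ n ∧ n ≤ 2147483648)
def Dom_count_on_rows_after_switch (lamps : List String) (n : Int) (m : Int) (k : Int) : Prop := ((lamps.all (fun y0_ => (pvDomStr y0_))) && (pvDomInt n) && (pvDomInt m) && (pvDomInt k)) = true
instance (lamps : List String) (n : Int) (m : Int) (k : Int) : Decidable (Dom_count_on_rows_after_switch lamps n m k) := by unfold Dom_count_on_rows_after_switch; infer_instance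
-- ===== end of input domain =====

-- B sorts the rows and finds the best qualifying run of equal rows in one scan,
-- replacing A's per-row rescan of the whole list (objective: alternative).

-- ===== PORT A =====
def count_on_rows_after_switch (lamps : List String) (n : Int) (m : Int) (k : Int) : Int :=
  lamps.foldl (fun max_on_rows row =>
    let zero_count : Int := (PySem.Str.count row "0" : Int)
    if zero_count ≤ k ∧ PySem.Int.mod (k - zero_count) 2 = 0 then
      let similar_rows : Int := (lamps.count row : Int)
      max max_on_rows similar_rows
    else max_on_rows) 0

-- ===== PORT B =====
-- Source B's inner `ok(row)`
def pvOk (k : Int) (row : String) : Bool :=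
  decide ((PySem.Str.count row "0" : Int) ≤ k ∧
    PySem.Int.mod (k - (PySem.Str.count row "0" : Int)) 2 = 0)

-- Source B's loop body: state (best, run, prev)
def pvScanStep (k : Int) (st : Int × Int × Option String) (row : String) :
    Int × Int × Option String :=
  let run' : Int := if st.2.2 = some row then st.2.1 + 1 else 1
  let best' : Int := if st.1 < run' ∧ pvOk k row then run' else st.1
  (best', run', some row)

def count_on_rows_after_switch_alt (lamps : List String) (n : Int) (m : Int) (k : Int) : Int :=
  ((PySem.List.sorted lamps (fun x => x) false).foldl (pvScanStep k) (0, 0, none)).1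

-- ===== PRECONDITION & SPEC =====
def Spec_count_on_rows_after_switch (lamps : List String) (n : Int) (m : Int) (k : Int) (out : Int) : Prop := out = count_on_rows_after_switch_alt lamps n m k
instance (lamps : List String) (n : Int) (m : Int) (k : Int) (out : Int) : Decidable (Spec_count_on_rows_after_switch lamps n m k out) := by unfold Spec_count_on_rows_after_switch; infer_instance

-- ===== CLAIM (what is proved, stated in full; the proofs are below) =====
def Claim_equal_count_on_rows_after_switch : Prop := ∀ (lamps : List String) (n : Int) (m : Int) (k : Int), Dom_count_on_rows_after_switch lamps n m k → Spec_count_on_rows_after_switch lamps n m k (count_on_rows_after_switch lamps n m k)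

-- ===== LEMMAS AND PROOFS =====

-- both results are characterised as "max (0, multiplicities of qualifying rows)"
def pvChar (k : Int) (l : List String) (v : Int) : Prop :=
  0 ≤ v ∧ (∀ x ∈ l, pvOk k x = true → (l.count x : Int) ≤ v) ∧
    (v = 0 ∨ ∃ x ∈ l, pvOk k x = true ∧ v = (l.count x : Int))

theorem pv_le_foldl (p : String → Bool) (g : String → Int) :
    ∀ (l : List String) (a : Int),
      a ≤ l.foldl (fun acc x => if p x then max acc (g x) else acc) a := by
  intro l
  induction l with
  | nil => intro a; simp
  | cons y t ih =>
      intro a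
      refine le_trans ?_ (ih _)
      by_cases hy : p y <;> simp [hy]

theorem pv_g_le_foldl (p : String → Bool) (g : String → Int) :
    ∀ (l : List String) (a : Int) (x : String), x ∈ l → p x = true →
      g x ≤ l.foldl (fun acc x => if p x then max acc (g x) else acc) a := by
  intro l
  induction l with
  | nil => intro a x hx; simp at hx
  | cons y t ih =>
      intro a x hx hp
      rcases List.mem_cons.mp hx with h | h
      · subst h
        refine le_trans ?_ (pv_le_foldl p g t _)
        simp [hp]
      · exact ih _ _ h hp

theorem pv_foldl_cases (p : String → Bool) (g : String → Int) :
    ∀ (l : List String) (a : Int),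
      l.foldl (fun acc x => if p x then max acc (g x) else acc) a = a ∨
        ∃ x ∈ l, p x = true ∧
          l.foldl (fun acc x => if p x then max acc (g x) else acc) a = g x := by
  intro l
  induction l with
  | nil => intro a; exact Or.inl rfl
  | cons y t ih =>
      intro a
      by_cases hy : p y
      · rcases ih (max a (g y)) with h | ⟨x, hx, hp, h⟩
        · rcases max_choice a (g y) with hm | hm
          · exact Or.inl (by rw [List.foldl_cons, if_pos hy, h, hm])
          · exact Or.inr ⟨y, List.mem_cons_self, hy, by rw [List.foldl_cons, if_pos hy, h, hm]⟩
        · exact Or.inr ⟨x, List.mem_cons_of_mem _ hx, hp, by rw [List.foldl_cons, if_pos hy, h]⟩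
      · rcases ih a with h | ⟨x, hx, hp, h⟩
        · exact Or.inl (by rw [List.foldl_cons, if_neg hy, h])
        · exact Or.inr ⟨x, List.mem_cons_of_mem _ hx, hp, by rw [List.foldl_cons, if_neg hy, h]⟩

-- A's fold, rewritten with the Bool condition pvOk
theorem pvA_eq (lamps : List String) (n m k : Int) :
    count_on_rows_after_switch lamps n m k =
      lamps.foldl (fun acc x => if pvOk k x then max acc (lamps.count x : Int) else acc) 0 := by
  unfold count_on_rows_after_switch
  refine PySem.List.foldl_congr_mem _ _ _ _ ?_
  intro acc x _
  dsimp only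
  by_cases h : (PySem.Str.count x "0" : Int) ≤ k ∧
      PySem.Int.mod (k - (PySem.Str.count x "0" : Int)) 2 = 0
  · simp [pvOk, h]
  · simp [pvOk, h]

theorem pvA_char (lamps : List String) (k : Int) :
    pvChar k lamps
      (lamps.foldl (fun acc x => if pvOk k x then max acc (lamps.count x : Int) else acc) 0) := by
  refine ⟨pv_le_foldl _ _ _ 0, ?_, ?_⟩
  · intro x hx hox; exact pv_g_le_foldl _ _ _ 0 x hx hox
  · rcases pv_foldl_cases (pvOk k) (fun x => (lamps.count x : Int)) lamps 0 with h | ⟨x, hx, hp, h⟩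
    · exact Or.inl h
    · exact Or.inr ⟨x, hx, hp, h⟩

theorem pv_char_unique (k : Int) (l : List String) (v w : Int)
    (hv : pvChar k l v) (hw : pvChar k l w) : v = w := by
  obtain ⟨hv0, hvub, hvw⟩ := hv
  obtain ⟨hw0, hwub, hww⟩ := hw
  rcases hvw with rfl | ⟨x, hx, hox, rfl⟩
  · rcases hww with rfl | ⟨y, hy, hoy, rfl⟩
    · rfl
    · have h1 := hvub y hy hoy
      have h2 : 1 ≤ l.count y := List.count_pos_iff.mpr hy
      have : (1 : Int) ≤ (l.count y : Int) := by exact_mod_cast h2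
      omega
  · rcases hww with rfl | ⟨y, hy, hoy, rfl⟩
    · have h1 := hwub x hx hox
      have h2 : 1 ≤ l.count x := List.count_pos_iff.mpr hx
      have : (1 : Int) ≤ (l.count x : Int) := by exact_mod_cast h2
      omega
    · have h1 := hvub y hy hoy
      have h2 := hwub x hx hox
      omega

theorem pv_char_perm {s l : List String} (h : s.Perm l) (k v : Int)
    (hc : pvChar k s v) : pvChar k l v := by
  obtain ⟨h0, hub, hw⟩ := hc
  refine ⟨h0, ?_, ?_⟩
  · intro x hx hox
    rw [← h.count_eq]
    exact hub x (h.mem_iff.mpr hx) hox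
  · rcases hw with rfl | ⟨x, hx, hox, rfl⟩
    · exact Or.inl rfl
    · exact Or.inr ⟨x, h.mem_iff.mp hx, hox, by rw [h.count_eq]⟩

-- in a ≤-sorted list every element is ≤ the last one
theorem pv_le_getLast : ∀ (l : List String), l.Pairwise (· ≤ ·) →
    ∀ (x L : String), x ∈ l → l.getLast? = some L → x ≤ L := by
  intro l
  induction l with
  | nil => intro _ x L hx; simp at hx
  | cons a t ih =>
      intro hp x L hx hL
      have ha : ∀ y ∈ t, a ≤ y := (List.pairwise_cons.mp hp).1
      have hpt : t.Pairwise (· ≤ ·) := (List.pairwise_cons.mp hp).2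
      cases t with
      | nil =>
          simp at hx hL
          subst hx
          subst hL
          exact le_rfl
      | cons b t' =>
          have hL' : (b :: t').getLast? = some L := by
            simpa using hL
          rcases List.mem_cons.mp hx with rfl | hx'
          · have hLm : L ∈ b :: t' := List.mem_of_getLast? hL'
            exact ha L hLm
          · exact ih hpt x L hx' hL'

-- the run-scan invariant over a sorted list
theorem pv_scan (k : Int) : ∀ (s : List String), s.Pairwise (· ≤ ·) →
    (s.foldl (pvScanStep k) (0, 0, none)).2.2 = s.getLast? ∧
    (∀ L, s.getLast? = some L →
      (s.foldl (pvScanStep k) (0, 0, none)).2.1 = (s.count L : Int)) ∧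
    pvChar k s (s.foldl (pvScanStep k) (0, 0, none)).1 := by
  intro s
  induction s using List.reverseRecOn with
  | nil =>
      intro _
      refine ⟨rfl, ?_, ?_⟩
      · intro L hL; simp at hL
      · exact ⟨le_refl 0, by intro x hx; simp at hx, Or.inl rfl⟩
  | append_singleton s x ih =>
      intro hp
      have hs : s.Pairwise (· ≤ ·) := (List.pairwise_append.mp hp).1
      have hall : ∀ a ∈ s, a ≤ x := by
        intro a ha
        exact (List.pairwise_append.mp hp).2.2 a ha x (List.mem_singleton.mpr rfl)
      obtain ⟨hprev, hrun, hchar⟩ := ih hs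
      rw [List.foldl_append, List.foldl_cons, List.foldl_nil]
      set F := s.foldl (pvScanStep k) (0, 0, none) with hF
      have hlast : (s ++ [x]).getLast? = some x := by simp
      by_cases hx : F.2.2 = some x
      · -- x continues the last run: x ∈ s
        have hgl : s.getLast? = some x := by rw [← hprev]; exact hx
        have hxs : x ∈ s := List.mem_of_getLast? hgl
        have hcnt : F.2.1 = (s.count x : Int) := hrun x hgl
        have hrun' : (pvScanStep k F x).2.1 = ((s ++ [x]).count x : Int) := by
          simp [pvScanStep, hx, hcnt, List.count_append]
        refine ⟨by simp [pvScanStep, hlast], ?_, ?_⟩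
        · intro L hL
          have : L = x := by rw [hlast] at hL; exact (Option.some_inj.mp hL).symm
          subst this
          exact hrun'
        · obtain ⟨hb0, hub, hw⟩ := hchar
          have hcx : ((s ++ [x]).count x : Int) = (s.count x : Int) + 1 := by
            simp [List.count_append]
          have hcy : ∀ y, y ≠ x → ((s ++ [x]).count y : Int) = (s.count y : Int) := by
            intro y hy
            have hxy : x ≠ y := Ne.symm hy
            simp [List.count_append, List.count_singleton, hxy]
          by_cases hc : F.1 ≤ F.2.1 ∧ pvOk k x = true
          · -- best' = run' = count x (s++[x])
            have hbest : (pvScanStep k F x).1 = F.2.1 + 1 := by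
              simp [pvScanStep, hx, hc.1, hc.2]
            refine ⟨?_, ?_, ?_⟩
            · rw [hbest]; omega
            · intro y hy hoy
              rcases List.mem_append.mp hy with hy' | hy'
              · by_cases hyx : y = x
                · subst hyx; rw [hbest, hcx, ← hcnt]
                · rw [hbest, hcy y hyx]
                  have := hub y hy' hoy
                  omega
              · have : y = x := List.mem_singleton.mp hy'
                subst this
                rw [hbest, hcx, ← hcnt]
            · exact Or.inr ⟨x, List.mem_append.mpr (Or.inr (List.mem_singleton.mpr rfl)),
                hc.2, by rw [hbest, hcx, hcnt]⟩
          · -- best' = b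
            have hbest : (pvScanStep k F x).1 = F.1 := by
              simp [pvScanStep, hx]
              intro h1 h2
              exact absurd ⟨h1, h2⟩ hc
            refine ⟨by rw [hbest]; exact hb0, ?_, ?_⟩
            · intro y hy hoy
              by_cases hyx : y = x
              · subst hyx
                rw [hbest, hcx, ← hcnt]
                rcases not_and_or.mp hc with h | h
                · omega
                · exact absurd hoy h
              · rcases List.mem_append.mp hy with hy' | hy'
                · rw [hbest, hcy y hyx]; exact hub y hy' hoy
                · exact absurd (List.mem_singleton.mp hy') hyx
            · rcases hw with h0 | ⟨y, hy, hoy, hv⟩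
              · exact Or.inl (by rw [hbest]; exact h0)
              · by_cases hyx : y = x
                · subst hyx
                  -- b = count y s = run' - 1, and ok y; then ¬(b < run') is absurd
                  exfalso
                  rcases not_and_or.mp hc with h | h
                  · rw [hv, hcnt] at h; omega
                  · exact h hoy
                · exact Or.inr ⟨y, List.mem_append.mpr (Or.inl hy), hoy,
                    by rw [hbest, hcy y hyx]; exact hv⟩
      · -- x starts a new run: x ∉ s
        have hxs : x ∉ s := by
          intro hxin
          rcases hgl : s.getLast? with _ | L
          · rw [List.getLast?_eq_none_iff] at hgl
            subst hgl; simp at hxin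
          · have h1 : x ≤ L := pv_le_getLast s hs x L hxin hgl
            have h2 : L ≤ x := hall L (List.mem_of_getLast? hgl)
            have : L = x := le_antisymm h2 h1
            subst this
            exact hx (by rw [hprev]; exact hgl)
        have hcnt0 : s.count x = 0 := List.count_eq_zero_of_not_mem hxs
        have hcx : ((s ++ [x]).count x : Int) = 1 := by
          simp [List.count_append, hcnt0]
        have hcy : ∀ y, y ≠ x → ((s ++ [x]).count y : Int) = (s.count y : Int) := by
          intro y hy
          have hxy : x ≠ y := Ne.symm hy
          simp [List.count_append, List.count_singleton, hxy]
        have hrun' : (pvScanStep k F x).2.1 = 1 := by simp [pvScanStep, hx]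
        refine ⟨by simp [pvScanStep, hlast], ?_, ?_⟩
        · intro L hL
          have : L = x := by rw [hlast] at hL; exact (Option.some_inj.mp hL).symm
          subst this
          rw [hrun', hcx]
        · obtain ⟨hb0, hub, hw⟩ := hchar
          by_cases hc : F.1 < 1 ∧ pvOk k x = true
          · have hbest : (pvScanStep k F x).1 = 1 := by
              have h0 : F.1 ≤ 0 := by have := hc.1; omega
              simp [pvScanStep, hx, hc.2]
              omega
            refine ⟨by rw [hbest]; omega, ?_, ?_⟩
            · intro y hy hoy
              by_cases hyx : y = x
              · subst hyx; rw [hbest, hcx]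
              · rcases List.mem_append.mp hy with hy' | hy'
                · rw [hbest, hcy y hyx]
                  have := hub y hy' hoy
                  omega
                · exact absurd (List.mem_singleton.mp hy') hyx
            · exact Or.inr ⟨x, List.mem_append.mpr (Or.inr (List.mem_singleton.mpr rfl)),
                hc.2, by rw [hbest, hcx]⟩
          · have hbest : (pvScanStep k F x).1 = F.1 := by
              simp [pvScanStep, hx]
              intro h1 h2
              exact absurd ⟨h1, h2⟩ hc
            refine ⟨by rw [hbest]; exact hb0, ?_, ?_⟩
            · intro y hy hoy
              by_cases hyx : y = x
              · subst hyx
                rw [hbest, hcx]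
                rcases not_and_or.mp hc with h | h
                · omega
                · exact absurd hoy h
              · rcases List.mem_append.mp hy with hy' | hy'
                · rw [hbest, hcy y hyx]; exact hub y hy' hoy
                · exact absurd (List.mem_singleton.mp hy') hyx
            · rcases hw with h0 | ⟨y, hy, hoy, hv⟩
              · exact Or.inl (by rw [hbest]; exact h0)
              · have hyx : y ≠ x := fun h => hxs (h ▸ hy)
                exact Or.inr ⟨y, List.mem_append.mpr (Or.inl hy), hoy,
                  by rw [hbest, hcy y hyx]; exact hv⟩

theorem pv_main (lamps : List String) (n m k : Int) :
    count_on_rows_after_switch lamps n m k = count_on_rows_after_switch_alt lamps n m k := by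
  have hA : pvChar k lamps (count_on_rows_after_switch lamps n m k) := by
    rw [pvA_eq lamps n m k]
    exact pvA_char lamps k
  have hperm : (PySem.List.sorted lamps (fun x => x) false).Perm lamps :=
    PySem.List.sorted_perm lamps (fun x => x) false
  have hpw : (PySem.List.sorted lamps (fun x => x) false).Pairwise (· ≤ ·) :=
    PySem.List.sorted_pairwise lamps (fun x => x)
  have hB : pvChar k lamps (count_on_rows_after_switch_alt lamps n m k) := by
    unfold count_on_rows_after_switch_alt
    exact pv_char_perm hperm k _ (pv_scan k _ hpw).2.2
  exact pv_char_unique k lamps _ _ hA hB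

-- ===== VERDICT (by name: the statement is the Claim_ definition above) =====
theorem count_on_rows_after_switch_spec : Claim_equal_count_on_rows_after_switch := by
  intro lamps n m k _
  unfold Spec_count_on_rows_after_switch
  exact pv_main lamps n m k
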